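-- pv_equiv track=rewrite | github.com/mscroggs/symfem | symfem/polynomials/polysets.py | serendipity_indices
-- ===== SOURCE A (Python) =====
-- import typing
--
-- def serendipity_indices(
--     total: int, linear: int, dim: int, done: typing.Optional[typing.List[int]] = None
-- ) -> typing.List[typing.List[int]]:
--     """Get the set indices for a serendipity polynomial set.
--
--     Args:
--         dim: The number of variables
--         order: The maximum polynomial degree
--         variables: The variables to use
--
--     Returns:
--         A set of polynomials
--     """
--     if done is None:
--         done = []
--     if len(done) == dim:
--         if done.count(1) >= linear:
--             return [done]
--         return []
--     if len(done) == dim - 1: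
--         return serendipity_indices(total, linear, dim, done=done + [total - sum(done)])
--     out = []
--     for i in range(total - sum(done) + 1):
--         out += serendipity_indices(total, linear, dim, done + [i])
--     return out
-- ===== SOURCE B (Python) =====
-- import typing
--
-- def serendipity_indices(
--     total: int, linear: int, dim: int, done: typing.Optional[typing.List[int]] = None
-- ) -> typing.List[typing.List[int]]:
--     """Iterative breadth-first enumeration, threading the running sum and the
--     count of ones, pruning partial tuples that can no longer reach `linear` ones."""
--     prefix = list(done) if done is not None else []
--     ones = prefix.count(1)
--     rem = total - sum(prefix)
--     k = dim - len(prefix)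
--     if k < 0:
--         return []
--     if k == 0:
--         return [prefix] if ones >= linear else []
--     if k == 1:
--         full = prefix + [rem]
--         return [full] if full.count(1) >= linear else []
--     if rem < 0:
--         return []  # a negative remainder admits no composition
--     # k >= 2: fill the k-1 free slots level by level; the last slot is forced.
--     partials = [([], rem, ones)]  # (suffix, remaining total, ones so far)
--     for slot in range(k - 1):
--         nxt = []
--         for suf, r, o in partials:
--             for i in range(r + 1):
--                 o2 = o + (i == 1)
--                 if o2 + (k - slot - 1) >= linear:
--                     nxt.append((suf + [i], r - i, o2))
--         partials = nxt
--     return [prefix + suf + [r] for suf, r, o in partials if o + (r == 1) >= linear]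
-- ===== Notes on version B (the rewrite author's own statement) =====
-- stated objective: alternative
-- what changed: Replaces A's depth-first recursion (which recomputes sum(done) and count(1) and copies the prefix at every node, filtering only at the leaves) with an iterative level-by-level enumeration that threads the running remainder and the running count of ones and prunes partial tuples that can no longer reach `linear` ones.
-- crash fix: When done is longer than dim (or done is None and dim is negative) and total - sum(done) is nonnegative, A recurses forever and raises RecursionError; B returns []. — e.g. on serendipity_indices(0, 0, -1, none): A raises RecursionError, B returns []
import Mathlib
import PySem

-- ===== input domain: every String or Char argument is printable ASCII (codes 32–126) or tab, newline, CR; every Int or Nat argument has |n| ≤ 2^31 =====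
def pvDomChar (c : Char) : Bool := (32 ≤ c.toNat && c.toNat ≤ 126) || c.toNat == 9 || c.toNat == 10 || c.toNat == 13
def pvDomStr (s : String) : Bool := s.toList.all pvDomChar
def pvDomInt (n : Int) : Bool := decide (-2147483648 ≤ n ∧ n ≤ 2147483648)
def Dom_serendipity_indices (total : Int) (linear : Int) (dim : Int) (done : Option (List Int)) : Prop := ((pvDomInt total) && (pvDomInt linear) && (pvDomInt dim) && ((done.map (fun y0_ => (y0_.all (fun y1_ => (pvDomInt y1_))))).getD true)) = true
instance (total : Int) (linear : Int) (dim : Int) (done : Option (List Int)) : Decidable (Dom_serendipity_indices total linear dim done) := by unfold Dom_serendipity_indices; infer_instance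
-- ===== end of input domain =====

-- B replaces A's depth-first recursion by an iterative level-by-level enumeration that
-- threads the running remainder and ones-count and prunes hopeless partial tuples (objective: alternative).

-- ===== PORT A =====
-- fuel bounds the recursion depth; under Pre_ the initial fuel is strictly more than
-- the number of recursive steps Python makes, so the 0-fuel branch is never reached.
def serendipityAux (total : Int) (linear : Int) (dim : Int) (done : List Int) (fuel : Nat) :
    List (List Int) :=
  if (done.length : Int) = dim then
    if linear ≤ (PySem.List.count done 1 : Int) then [done] else []
  else if (done.length : Int) = dim - 1 then
    match fuel with
    | 0 => []
    | f + 1 => serendipityAux total linear dim (done ++ [total - done.sum]) f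
  else
    match fuel with
    | 0 => []
    | f + 1 =>
      (PySem.List.pyRange 0 (total - done.sum + 1) 1).foldl
        (fun out i => out ++ serendipityAux total linear dim (done ++ [i]) f) []

def serendipity_indices (total : Int) (linear : Int) (dim : Int) (done : Option (List Int)) :
    List (List Int) :=
  let d := done.getD []
  serendipityAux total linear dim d ((dim - d.length).toNat + 1)

-- ===== PORT B =====
def serendipity_indices_alt (total : Int) (linear : Int) (dim : Int) (done : Option (List Int)) :
    List (List Int) :=
  let pre := done.getD []
  let ones : Int := (PySem.List.count pre 1 : Int)
  let rem : Int := total - pre.sum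
  let k : Int := dim - pre.length
  if k < 0 then []
  else if k = 0 then (if linear ≤ ones then [pre] else [])
  else if k = 1 then
    let full := pre ++ [rem]
    if linear ≤ (PySem.List.count full 1 : Int) then [full] else []
  else if rem < 0 then []  -- a negative remainder admits no composition
  else
    let partials :=
      (PySem.List.pyRange 0 (k - 1) 1).foldl
        (fun partials slot =>
          partials.foldl
            (fun nxt sro =>
              (PySem.List.pyRange 0 (sro.2.1 + 1) 1).foldl
                (fun nxt i =>
                  let o2 := sro.2.2 + (if i = 1 then (1 : Int) else 0)
                  if linear ≤ o2 + (k - slot - 1) then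
                    nxt ++ [(sro.1 ++ [i], sro.2.1 - i, o2)]
                  else nxt)
                nxt)
            [])
        [(([] : List Int), rem, ones)]
    (partials.filter (fun sro => linear ≤ sro.2.2 + (if sro.2.1 = 1 then (1 : Int) else 0))).map
      (fun sro => pre ++ sro.1 ++ [sro.2.1])

-- ===== PRECONDITION & SPEC =====
-- Pre_ excludes exactly the inputs where the initial done is longer than dim (including
-- done = None with dim < 0) while the remaining total is nonnegative: there Python A
-- recurses forever and raises RecursionError.
def Pre_serendipity_indices (total : Int) (linear : Int) (dim : Int) (done : Option (List Int)) : Prop :=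
  ((done.getD []).length : Int) ≤ dim ∨ total - (done.getD []).sum < 0
instance (total : Int) (linear : Int) (dim : Int) (done : Option (List Int)) :
    Decidable (Pre_serendipity_indices total linear dim done) := by
  unfold Pre_serendipity_indices; infer_instance

def pvWitness_serendipity_indices : Int × Int × Int × Option (List Int) := (3, 1, 2, none)

-- When done is longer than dim (or done is None and dim < 0) and the remaining total is
-- nonnegative, A raises RecursionError; B returns [].
def Raises_serendipity_indices (total : Int) (linear : Int) (dim : Int) (done : Option (List Int)) : Prop :=
  dim < ((done.getD []).length : Int) ∧ 0 ≤ total - (done.getD []).sum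
instance (total : Int) (linear : Int) (dim : Int) (done : Option (List Int)) :
    Decidable (Raises_serendipity_indices total linear dim done) := by
  unfold Raises_serendipity_indices; infer_instance
def pvRaiseWitness_serendipity_indices : Int × Int × Int × Option (List Int) := (0, 0, -1, none)
def pvRaiseWitnessOut_serendipity_indices : List (List Int) := []

def Spec_serendipity_indices (total : Int) (linear : Int) (dim : Int) (done : Option (List Int))
    (out : List (List Int)) : Prop := out = serendipity_indices_alt total linear dim done
instance (total : Int) (linear : Int) (dim : Int) (done : Option (List Int)) (out : List (List Int)) :
    Decidable (Spec_serendipity_indices total linear dim done out) := by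
  unfold Spec_serendipity_indices; infer_instance

-- ===== CLAIM (what is proved, stated in full; the proofs are below) =====
def Claim_equal_serendipity_indices : Prop := ∀ (total : Int) (linear : Int) (dim : Int) (done : Option (List Int)), Dom_serendipity_indices total linear dim done → Pre_serendipity_indices total linear dim done → Spec_serendipity_indices total linear dim done (serendipity_indices total linear dim done)

def Claim_raises_serendipity_indices : Prop := (∀ (total : Int) (linear : Int) (dim : Int) (done : Option (List Int)), Dom_serendipity_indices total linear dim done → Raises_serendipity_indices total linear dim done → ¬ Pre_serendipity_indices total linear dim done) ∧ (Dom_serendipity_indices (pvRaiseWitness_serendipity_indices.1) (pvRaiseWitness_serendipity_indices.2.1) (pvRaiseWitness_serendipity_indices.2.2.1) (pvRaiseWitness_serendipity_indices.2.2.2) ∧ Raises_serendipity_indices (pvRaiseWitness_serendipity_indices.1) (pvRaiseWitness_serendipity_indices.2.1) (pvRaiseWitness_serendipity_indices.2.2.1) (pvRaiseWitness_serendipity_indices.2.2.2) ∧ serendipity_indices_alt (pvRaiseWitness_serendipity_indices.1) (pvRaiseWitness_serendipity_indices.2.1) (pvRaiseWitness_serendipity_indices.2.2.1) (pvRaiseWitness_serendipity_indices.2.2.2)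 = pvRaiseWitnessOut_serendipity_indices)

-- ===== LEMMAS AND PROOFS =====

/-- Reference enumeration: the lexicographic list of `n`-tuples that A's recursion appends
to a given prefix (last entry forced to the remainder once only one slot is left). -/
def Eenum : Nat → Int → List (List Int)
  | 0, _ => [[]]
  | 1, r => [[r]]
  | (n + 2), r =>
      (PySem.List.pyRange 0 (r + 1) 1).flatMap
        (fun i => (Eenum (n + 1) (r - i)).map (fun t => i :: t))

lemma length_mem_Eenum : ∀ (n : Nat) (r : Int) (t : List Int), t ∈ Eenum n r → t.length = n := by
  intro n
  induction n using Nat.strong_induction_on with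
  | _ n ih =>
    intro r t ht
    match n with
    | 0 => simp [Eenum] at ht; simp [ht]
    | 1 => simp [Eenum] at ht; simp [ht]
    | n + 2 =>
      simp only [Eenum, List.mem_flatMap, List.mem_map] at ht
      obtain ⟨i, _, s, hs, rfl⟩ := ht
      simp [ih (n + 1) (by omega) _ _ hs]

/-- The not-yet-picked entries can contribute at most their number of ones. -/
lemma count_le_of_mem_Eenum (n : Nat) (r : Int) (t : List Int) (ht : t ∈ Eenum n r) :
    (t.count 1 : Int) ≤ (n : Int) := by
  have := List.count_le_length (l := t) (a := (1 : Int))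
  have hl := length_mem_Eenum n r t ht
  omega

lemma Eenum_neg_nil (n : Nat) (r : Int) (hr : r < 0) : Eenum (n + 2) r = [] := by
  rw [Eenum, PySem.List.pyRange_one_eq_nil (by omega)]
  rfl

def pvP (linear : Int) (l : List Int) : Bool := decide (linear ≤ (PySem.List.count l 1 : Int))

/-- Characterisation of A's recursion. -/
lemma auxA_eq (total linear dim : Int) :
    ∀ (fuel : Nat) (n : Nat) (done : List Int), (done.length : Int) + n = dim → n ≤ fuel →
      serendipityAux total linear dim done fuel
        = ((Eenum n (total - done.sum)).map (fun t => done ++ t)).filter (pvP linear) := by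
  intro fuel
  induction fuel with
  | zero =>
    intro n done hlen hf
    interval_cases n
    rw [serendipityAux]
    rw [if_pos (show (done.length : Int) = dim by omega)]
    have h0 : (Eenum 0 (total - done.sum)).map (fun t => done ++ t) = [done] := by simp [Eenum]
    rw [h0]
    by_cases h : linear ≤ (PySem.List.count done 1 : Int) <;>
      simp [h, pvP, List.filter_cons]
  | succ f ihf =>
    intro n done hlen hf
    match n with
    | 0 =>
      rw [serendipityAux]
      rw [if_pos (show (done.length : Int) = dim by omega)]
      have h0 : (Eenum 0 (total - done.sum)).map (fun t => done ++ t) = [done] := by simp [Eenum]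
      rw [h0]
      by_cases h : linear ≤ (PySem.List.count done 1 : Int) <;>
        simp [h, pvP, List.filter_cons]
    | 1 =>
      rw [serendipityAux]
      rw [if_neg (by omega), if_pos (by omega)]
      rw [ihf 0 (done ++ [total - done.sum]) (by simp; omega) (by omega)]
      simp [Eenum]
    | n + 2 =>
      rw [serendipityAux]
      rw [if_neg (by omega), if_neg (by omega)]
      have hrec : ∀ i : Int,
          serendipityAux total linear dim (done ++ [i]) f
            = ((Eenum (n + 1) (total - done.sum - i)).map (fun t => (done ++ [i]) ++ t)).filter
                (pvP linear) := by
        intro i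
        have := ihf (n + 1) (done ++ [i]) (by simp; omega) (by omega)
        simpa [List.sum_append, sub_sub] using this
      simp only [hrec]
      rw [PySem.List.foldl_append_eq_flatMap]
      simp only [List.nil_append, Eenum, List.filter_map, List.filter_flatMap, List.map_flatMap]
      refine List.flatMap_congr ?_
      intro i _
      simp only [List.map_map]
      have hfun : ∀ t : List Int, done ++ [i] ++ t = done ++ (i :: t) := by
        intro t; simp
      simp [Function.comp_def, hfun, List.filter_map]

lemma pvFlatMap_filter {α β : Type} (p : α → Bool) (g : α → List β) (l : List α) :
    (l.filter p).flatMap g = l.flatMap (fun x => if p x then g x else []) := by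
  induction l with
  | nil => rfl
  | cons a l ih =>
    simp only [List.filter_cons, List.flatMap_cons]
    split <;> simp_all

/-- One state of B's level loop: (suffix so far, remaining total, ones so far). -/
def pvExpand (linear k s : Int) (st : List Int × Int × Int) : List (List Int × Int × Int) :=
  ((PySem.List.pyRange 0 (st.2.1 + 1) 1).filter
      (fun i => decide (linear ≤ st.2.2 + (if i = 1 then (1 : Int) else 0) + (k - s - 1)))).map
    (fun i => (st.1 ++ [i], st.2.1 - i, st.2.2 + (if i = 1 then (1 : Int) else 0)))

lemma step_eq (linear k s : Int) :
    ∀ (parts : List (List Int × Int × Int)) (acc : List (List Int × Int × Int)),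
      parts.foldl
        (fun nxt sro =>
          (PySem.List.pyRange 0 (sro.2.1 + 1) 1).foldl
            (fun nxt i =>
              let o2 := sro.2.2 + (if i = 1 then (1 : Int) else 0)
              if linear ≤ o2 + (k - s - 1) then nxt ++ [(sro.1 ++ [i], sro.2.1 - i, o2)] else nxt)
            nxt)
        acc
      = acc ++ parts.flatMap (pvExpand linear k s) := by
  intro parts
  induction parts with
  | nil => intro acc; simp
  | cons st rest ih =>
    intro acc
    simp only [List.foldl_cons, List.flatMap_cons, ih]
    rw [PySem.List.foldl_append_ite]
    simp [pvExpand, List.append_assoc]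

/-- B's final projection of a state list, without the outer prefix. -/
def pvFinal (linear : Int) (parts : List (List Int × Int × Int)) : List (List Int) :=
  (parts.filter (fun sro => decide (linear ≤ sro.2.2 + (if sro.2.1 = 1 then (1 : Int) else 0)))).map
    (fun sro => sro.1 ++ [sro.2.1])

lemma count_singleton_one (r : Int) :
    ((List.count 1 [r] : Nat) : Int) = if r = 1 then (1 : Int) else 0 := by
  rcases eq_or_ne r 1 with h | h <;> simp [h]

lemma count_cons_one (i : Int) (t : List Int) :
    ((i :: t).count 1 : Int) = (if i = 1 then (1 : Int) else 0) + (t.count 1 : Int) := by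
  rcases eq_or_ne i 1 with h | h
  · simp [h, List.count_cons]; omega
  · simp [List.count_cons, h]

lemma E1_contrib (linear : Int) (st : List Int × Int × Int) :
    ((Eenum 1 st.2.1).filter (fun t => decide (linear ≤ st.2.2 + (List.count 1 t : Int)))).map
        (fun t => st.1 ++ t)
      = if linear ≤ st.2.2 + (if st.2.1 = 1 then (1 : Int) else 0) then [st.1 ++ [st.2.1]] else [] := by
  simp only [Eenum, List.filter_cons, List.filter_nil, count_singleton_one]
  by_cases h : linear ≤ st.2.2 + (if st.2.1 = 1 then (1 : Int) else 0) <;> simp [h]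

/-- Running B's level loop from slot `s` with `m` free slots left, then finalising,
enumerates for each state exactly its admissible completions. -/
lemma runB_eq (linear k : Int) :
    ∀ (m : Nat) (s : Int) (states : List (List Int × Int × Int)), s + (m : Int) = k - 1 →
      pvFinal linear
        ((PySem.List.pyRange s (k - 1) 1).foldl
          (fun parts slot => parts.flatMap (pvExpand linear k slot)) states)
      = states.flatMap
          (fun st =>
            ((Eenum (m + 1) st.2.1).filter
                (fun t => decide (linear ≤ st.2.2 + (t.count 1 : Int)))).map
              (fun t => st.1 ++ t)) := by
  intro m
  induction m with
  | zero =>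
    intro s states hs
    rw [PySem.List.pyRange_one_eq_nil (by omega)]
    simp only [List.foldl_nil, Nat.zero_add, E1_contrib]
    induction states with
    | nil => rfl
    | cons st rest ih =>
      simp only [pvFinal, List.filter_cons, List.flatMap_cons] at ih ⊢
      by_cases h : linear ≤ st.2.2 + (if st.2.1 = 1 then (1 : Int) else 0)
      · simp [h, ih]
      · simp [h, ih]
  | succ m ihm =>
    intro s states hs
    rw [PySem.List.pyRange_one_cons (by omega)]
    simp only [List.foldl_cons]
    rw [ihm (s + 1) _ (by omega)]
    rw [List.flatMap_assoc]
    refine List.flatMap_congr ?_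
    intro st _
    obtain ⟨suf, r, o⟩ := st
    simp only [pvExpand, List.flatMap_map]
    have hslots : k - s - 1 = (m : Int) + 1 := by omega
    -- move the pruning filter into the flatMap
    rw [show ((PySem.List.pyRange 0 (r + 1) 1).filter
          (fun i => decide (linear ≤ o + (if i = 1 then (1 : Int) else 0) + (k - s - 1)))).flatMap
          (fun i =>
            ((Eenum (m + 1) (r - i)).filter
                (fun t => decide (linear ≤ o + (if i = 1 then (1 : Int) else 0) + (t.count 1 : Int)))).map
              (fun t => (suf ++ [i]) ++ t))
        = (PySem.List.pyRange 0 (r + 1) 1).flatMap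
          (fun i =>
            ((Eenum (m + 1) (r - i)).filter
                (fun t => decide (linear ≤ o + (if i = 1 then (1 : Int) else 0) + (t.count 1 : Int)))).map
              (fun t => (suf ++ [i]) ++ t)) from ?_]
    · simp only [Eenum, List.filter_flatMap, List.map_flatMap]
      refine List.flatMap_congr ?_
      intro i _
      simp [Function.comp_def, count_cons_one, List.filter_map, add_assoc]
    · -- pruned branches contribute nothing
      rw [pvFlatMap_filter]
      refine List.flatMap_congr ?_
      intro i _
      by_cases hp : linear ≤ o + (if i = 1 then (1 : Int) else 0) + (k - s - 1)
      · rw [if_pos (by simpa using hp)]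
      · rw [if_neg (by simpa using hp)]
        have : (Eenum (m + 1) (r - i)).filter
            (fun t => decide (linear ≤ o + (if i = 1 then (1 : Int) else 0) + (t.count 1 : Int))) = [] := by
          rw [List.filter_eq_nil_iff]
          intro t ht
          have hc := count_le_of_mem_Eenum (m + 1) (r - i) t ht
          simp only [decide_eq_true_eq]
          push_cast at hc ⊢
          omega
        simp [this]

lemma pvFoldl_ext {α β : Type} (f g : β → α → β) (h : ∀ b a, f b a = g b a) :
    ∀ (l : List α) (init : β), l.foldl f init = l.foldl g init := by
  intro l
  induction l with
  | nil => intro init; rfl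
  | cons a l ih => intro init; simp only [List.foldl_cons, h, ih]

-- ===== VERDICT (by name: the statement is the Claim_ definition above) =====
theorem serendipity_indices_spec : Claim_equal_serendipity_indices := by
  intro total linear dim done _ hpre
  unfold Spec_serendipity_indices
  unfold Pre_serendipity_indices at hpre
  by_cases hlen : ((done.getD [] : List Int).length : Int) ≤ dim
  case neg =>
    have hrem : total - (done.getD []).sum < 0 := by tauto
    rw [serendipity_indices, serendipityAux]
    rw [if_neg (by omega), if_neg (by omega)]
    rw [PySem.List.pyRange_one_eq_nil (by omega)]
    rw [serendipity_indices_alt]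
    simp only []
    rw [if_pos (by omega)]
    rfl
  have hA : serendipity_indices total linear dim done
      = ((Eenum (dim - (done.getD []).length).toNat (total - (done.getD []).sum)).map
          (fun t => (done.getD []) ++ t)).filter (pvP linear) := by
    rw [serendipity_indices]
    exact auxA_eq total linear dim _ _ _ (by omega) (by omega)

  rw [hA, serendipity_indices_alt]
  simp only []
  by_cases hk0 : dim - ((done.getD [] : List Int).length : Int) = 0
  · rw [if_neg (by omega), if_pos hk0]
    rw [show (dim - ((done.getD [] : List Int).length : Int)).toNat = 0 by omega]
    by_cases h : linear ≤ ((List.count 1 (done.getD []) : Nat) : Int) <;>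
      simp [Eenum, pvP, PySem.List.count_eq, List.filter_cons, h]
  · by_cases hk1 : dim - ((done.getD [] : List Int).length : Int) = 1
    · rw [if_neg (by omega), if_neg hk0, if_pos hk1]
      rw [show (dim - ((done.getD [] : List Int).length : Int)).toNat = 1 by omega]
      by_cases h : linear ≤
          ((List.count 1 ((done.getD []) ++ [total - (done.getD []).sum]) : Nat) : Int) <;>
        simp [Eenum, pvP, PySem.List.count_eq, List.filter_cons, List.count_append,
          Nat.cast_add, h]
    · have h2 : 2 ≤ dim - ((done.getD [] : List Int).length : Int) := by omega
      rw [if_neg (by omega), if_neg hk0, if_neg hk1]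
      by_cases hrem : total - ((done.getD [] : List Int).sum) < 0
      · rw [if_pos hrem]
        rw [show (dim - ((done.getD [] : List Int).length : Int)).toNat
              = ((dim - ((done.getD [] : List Int).length : Int)).toNat - 2) + 2 by omega]
        rw [Eenum_neg_nil _ _ hrem]
        rfl
      · rw [if_neg hrem]
        rw [pvFoldl_ext _
            (fun parts slot =>
              parts.flatMap (pvExpand linear (dim - ((done.getD [] : List Int).length : Int)) slot))
            (by
              intro parts slot
              simpa using step_eq linear (dim - ((done.getD [] : List Int).length : Int)) slot parts [])]
        have hm : (0 : Int) + ((dim - ((done.getD [] : List Int).length : Int) - 1).toNat : Int)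
            = dim - ((done.getD [] : List Int).length : Int) - 1 := by omega
        have hrun := runB_eq linear (dim - ((done.getD [] : List Int).length : Int))
          ((dim - ((done.getD [] : List Int).length : Int) - 1).toNat) 0
          [(([] : List Int), total - (done.getD []).sum, (PySem.List.count (done.getD []) 1 : Int))]
          hm
        have hfin : ∀ parts : List (List Int × Int × Int),
            (parts.filter
                (fun sro => decide (linear ≤ sro.2.2 + (if sro.2.1 = 1 then (1 : Int) else 0)))).map
              (fun sro => (done.getD []) ++ sro.1 ++ [sro.2.1])
            = (pvFinal linear parts).map (fun l => (done.getD []) ++ l) := by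
          intro parts
          simp [pvFinal, List.map_map, Function.comp_def]
        rw [hfin, hrun]
        rw [show (dim - ((done.getD [] : List Int).length : Int)).toNat
              = (dim - ((done.getD [] : List Int).length : Int) - 1).toNat + 1 by omega]
        simp only [List.flatMap_cons, List.flatMap_nil, List.append_nil, List.nil_append,
          List.map_map, List.filter_map]
        have hcomp : ((fun t => (done.getD [] : List Int) ++ t) ∘ fun t : List Int => t)
            = fun t => (done.getD []) ++ t := by funext t; rfl
        rw [hcomp]
        refine congrArg _ (List.filter_congr ?_)
        intro t _
        simp only [Function.comp_def, pvP, PySem.List.count_eq, List.count_append, Nat.cast_add,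
          decide_eq_decide]

@[simp]
theorem serendipity_indices_raises : Claim_raises_serendipity_indices := by
  unfold Claim_raises_serendipity_indices
  constructor
  · intro total linear dim done _ hr hp
    exact absurd hp (by unfold Pre_serendipity_indices Raises_serendipity_indices at *; omega)
  · refine ⟨by decide, by decide, by decide⟩
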